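-- pv_equiv track=rewrite | github.com/Jerempire/gym-anything | benchmarks/cua_world/environments/calligra_words_env/tasks/keynote_speech_formatting/verifier.py | check_paragraph_typography
-- ===== SOURCE A (Python) =====
-- def check_paragraph_typography(para, styles):
--     style_name = para.get('style_name', '')
--     curr = styles.get(style_name, {})
--     font_size = curr.get('font_size', '')
--     line_height = curr.get('line_height', '')
--     parent = curr.get('parent', '')
--
--     for _ in range(3):
--         if (font_size and line_height) or not parent:
--             break
--         p_style = styles.get(parent, {})
--         if not font_size:
--             font_size = p_style.get('font_size', '')
--         if not line_height:
--             line_height = p_style.get('line_height', '')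
--         parent = p_style.get('parent', '')
--
--     return font_size, line_height
-- ===== SOURCE B (Python) =====
-- def check_paragraph_typography(para, styles):
--     # gather the style chain (base style + up to 3 parent hops), then select
--     s = styles.get(para.get('style_name', ''), {})
--     chain = [s]
--     for _ in range(3):
--         parent = s.get('parent', '')
--         if not parent:
--             break
--         s = styles.get(parent, {})
--         chain.append(s)
--     font_size = next((v for v in (st.get('font_size', '') for st in chain) if v), '')
--     line_height = next((v for v in (st.get('line_height', '') for st in chain) if v), '')
--     return font_size, line_height
-- ===== Notes on version B (the rewrite author's own statement) =====
-- stated objective: simpler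
-- what changed: Replaces A's interleaved walk-and-fill loop over mutable (font_size, line_height, parent) state with a gather-then-select decomposition: first collect the style chain (base + up to 3 parent hops), then pick each field as the first non-empty value along the chain.
import Mathlib
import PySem

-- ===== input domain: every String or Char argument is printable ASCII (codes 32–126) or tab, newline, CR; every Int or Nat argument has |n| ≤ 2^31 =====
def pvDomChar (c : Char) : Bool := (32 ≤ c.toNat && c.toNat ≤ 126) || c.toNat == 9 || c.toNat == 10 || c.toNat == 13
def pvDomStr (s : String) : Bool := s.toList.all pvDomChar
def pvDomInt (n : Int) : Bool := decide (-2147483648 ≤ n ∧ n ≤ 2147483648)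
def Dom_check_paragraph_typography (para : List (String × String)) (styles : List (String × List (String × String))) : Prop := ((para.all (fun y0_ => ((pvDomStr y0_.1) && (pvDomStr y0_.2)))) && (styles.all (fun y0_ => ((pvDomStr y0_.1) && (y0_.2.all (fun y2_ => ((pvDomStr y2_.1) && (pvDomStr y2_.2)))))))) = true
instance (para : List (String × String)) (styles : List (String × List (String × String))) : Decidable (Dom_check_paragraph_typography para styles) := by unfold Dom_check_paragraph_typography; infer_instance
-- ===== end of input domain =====

-- B replaces A's interleaved walk-and-fill loop with a gather-chain-then-select decomposition (simpler; same cost).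

-- ===== PORT A =====
-- A's `for _ in range(3)` loop with `break`, as structural recursion on the remaining iteration count;
-- state is exactly A's mutable (font_size, line_height, parent).
def pvALoop (styles : List (String × List (String × String))) :
    Nat → String → String → String → String × String
  | 0, font_size, line_height, _ => (font_size, line_height)
  | n + 1, font_size, line_height, parent =>
    if (font_size ≠ "" ∧ line_height ≠ "") ∨ parent = "" then (font_size, line_height)
    else
      let p_style := (PySem.Dict.mk styles).getD parent []
      let font_size' := if font_size = "" then (PySem.Dict.mk p_style).getD "font_size" "" else font_size
      let line_height' := if line_height = "" then (PySem.Dict.mk p_style).getD "line_height" "" else line_height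
      pvALoop styles n font_size' line_height' ((PySem.Dict.mk p_style).getD "parent" "")

def check_paragraph_typography (para : List (String × String)) (styles : List (String × List (String × String))) : String × String :=
  let style_name := (PySem.Dict.mk para).getD "style_name" ""
  let curr := (PySem.Dict.mk styles).getD style_name []
  let font_size := (PySem.Dict.mk curr).getD "font_size" ""
  let line_height := (PySem.Dict.mk curr).getD "line_height" ""
  let parent := (PySem.Dict.mk curr).getD "parent" ""
  pvALoop styles 3 font_size line_height parent

-- ===== PORT B =====
-- collect the style chain: current style plus up to `fuel` parent hops, stopping at an empty parent
def pvBChain (styles : List (String × List (String × String))) :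
    Nat → List (String × String) → List (List (String × String))
  | 0, s => [s]
  | n + 1, s =>
    let parent := (PySem.Dict.mk s).getD "parent" ""
    if parent = "" then [s]
    else s :: pvBChain styles n ((PySem.Dict.mk styles).getD parent [])

-- next((v for v in vals if v), '')
def pvFirstNonEmpty : List String → String
  | [] => ""
  | v :: rest => if v ≠ "" then v else pvFirstNonEmpty rest

def check_paragraph_typography_alt (para : List (String × String)) (styles : List (String × List (String × String))) : String × String :=
  let s := (PySem.Dict.mk styles).getD ((PySem.Dict.mk para).getD "style_name" "") []
  let chain := pvBChain styles 3 s
  let font_size := pvFirstNonEmpty (chain.map (fun st => (PySem.Dict.mk st).getD "font_size" ""))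
  let line_height := pvFirstNonEmpty (chain.map (fun st => (PySem.Dict.mk st).getD "line_height" ""))
  (font_size, line_height)

-- ===== PRECONDITION & SPEC =====
def Spec_check_paragraph_typography (para : List (String × String)) (styles : List (String × List (String × String))) (out : String × String) : Prop := out = check_paragraph_typography_alt para styles
instance (para : List (String × String)) (styles : List (String × List (String × String))) (out : String × String) : Decidable (Spec_check_paragraph_typography para styles out) := by unfold Spec_check_paragraph_typography; infer_instance

-- ===== CLAIM (what is proved, stated in full; the proofs are below) =====
def Claim_equal_check_paragraph_typography : Prop := ∀ (para : List (String × String)) (styles : List (String × List (String × String))), Dom_check_paragraph_typography para styles → Spec_check_paragraph_typography para styles (check_paragraph_typography para styles)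

-- ===== LEMMAS AND PROOFS =====

-- the tail of B's chain, starting from a parent NAME (possibly empty) with `fuel` hops left
def pvChainFrom (styles : List (String × List (String × String))) :
    Nat → String → List (List (String × String))
  | 0, _ => []
  | n + 1, parent =>
    if parent = "" then []
    else
      let p := (PySem.Dict.mk styles).getD parent []
      p :: pvChainFrom styles n ((PySem.Dict.mk p).getD "parent" "")

theorem pvBChain_eq_chainFrom (styles : List (String × List (String × String)))
    (n : Nat) (s : List (String × String)) :
    pvBChain styles n s = s :: pvChainFrom styles n ((PySem.Dict.mk s).getD "parent" "") := by
  induction n generalizing s with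
  | zero => simp [pvBChain, pvChainFrom]
  | succ n ih =>
    simp only [pvBChain, pvChainFrom]
    split_ifs with h
    · rfl
    · simp [ih]

theorem pvFirstNonEmpty_cons_ne (v : String) (rest : List String) (h : v ≠ "") :
    pvFirstNonEmpty (v :: rest) = v := by simp [pvFirstNonEmpty, h]

theorem pvFirstNonEmpty_cons_self (v : String) :
    pvFirstNonEmpty (v :: []) = v := by
  by_cases h : v = "" <;> simp [pvFirstNonEmpty, h]

theorem pvALoop_eq_select (styles : List (String × List (String × String)))
    (n : Nat) (parent font_size line_height : String) :
    pvALoop styles n font_size line_height parent =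
      (pvFirstNonEmpty (font_size :: (pvChainFrom styles n parent).map (fun st => (PySem.Dict.mk st).getD "font_size" "")),
       pvFirstNonEmpty (line_height :: (pvChainFrom styles n parent).map (fun st => (PySem.Dict.mk st).getD "line_height" ""))) := by
  induction n generalizing parent font_size line_height with
  | zero => simp [pvALoop, pvChainFrom, pvFirstNonEmpty_cons_self]
  | succ n ih =>
    by_cases hp : parent = ""
    · simp [pvALoop, pvChainFrom, hp, pvFirstNonEmpty_cons_self]
    · by_cases hboth : font_size ≠ "" ∧ line_height ≠ ""
      · have : pvALoop styles (n+1) font_size line_height parent = (font_size, line_height) := by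
          simp [pvALoop, hboth]
        rw [this]
        simp only [pvChainFrom, if_neg hp, List.map_cons]
        rw [pvFirstNonEmpty_cons_ne _ _ hboth.1, pvFirstNonEmpty_cons_ne _ _ hboth.2]
      · have hstep : pvALoop styles (n+1) font_size line_height parent =
            pvALoop styles n
              (if font_size = "" then (PySem.Dict.mk ((PySem.Dict.mk styles).getD parent [])).getD "font_size" "" else font_size)
              (if line_height = "" then (PySem.Dict.mk ((PySem.Dict.mk styles).getD parent [])).getD "line_height" "" else line_height)
              ((PySem.Dict.mk ((PySem.Dict.mk styles).getD parent [])).getD "parent" "") := by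
          simp [pvALoop, hboth, hp]
        rw [hstep, ih]
        simp only [pvChainFrom, if_neg hp, List.map_cons, Prod.mk.injEq]
        constructor
        · by_cases hf : font_size = "" <;> simp [pvFirstNonEmpty, hf]
        · by_cases hl : line_height = "" <;> simp [pvFirstNonEmpty, hl]

-- ===== VERDICT (by name: the statement is the Claim_ definition above) =====
theorem check_paragraph_typography_spec : Claim_equal_check_paragraph_typography := by
  intro para styles _
  unfold Spec_check_paragraph_typography check_paragraph_typography check_paragraph_typography_alt
  rw [pvALoop_eq_select]
  simp only [pvBChain_eq_chainFrom, List.map_cons]
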